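-- pv_equiv track=rewrite | github.com/KatharinaPreissinger/Malaria_stage_classifier | ClassificationRBC/extractCuts.py | find_coordborder
-- ===== SOURCE A (Python) =====
-- def find_coordborder(cnt_drawn, img):
--     """Finds points inside cell contour and returns their coordinates
--
--     Parameters
--     ----------
--     cnt_drawn : ndarray
--         1 dimensional array with type int, int, float, float that contains the index of a rectangle
--         with corresponding contour,
--         the y- and x-coordinate of the contour
--     img : ndarray
--         N dimensional array with type float that contains the z_values of the data
--
--     Returns
--     -------
--     array
--         an array with type float, float, float that contains the y-coordinate, the minimum and
--         maximum x-coordinate of the points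
--         inside a contour
--
--     """
--     img_coord = []
--     for cnt in cnt_drawn:
--         cnt_minx = min(cnt, key = lambda c: c[0])
--         cnt_miny = min(cnt, key = lambda c: c[1])
--         cnt_maxx = max(cnt, key = lambda c: c[0])
--         cnt_maxy = max(cnt, key = lambda c: c[1])
--         x_min = cnt_minx[0]
--         x_max = cnt_maxx[0]
--         y_min = cnt_miny[1]
--         y_max = cnt_maxy[1]
--
--         icoord = []
--         y = y_min + 1
--         for y in range(y_min + 1,y_max):
--             coord = []
--             for c in cnt:
--                 x_cnt = c[0]
--                 y_cnt = c[1]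
--                 if y_cnt == y:
--                     coord.append((x_cnt, y_cnt))
--             if len(coord) > 0:
--                 x_imgmin = min(coord, key = lambda co: co[0])
--                 x_imgmax = max(coord, key = lambda co: co[0])
--                 icoord.append((y, x_imgmin[0], x_imgmax[0]))
--         img_coord.append(icoord)
--     return img_coord
-- ===== SOURCE B (Python) =====
-- def find_coordborder(cnt_drawn, img):
--     """One pass per contour: group points by y in a dict tracking min/max x,
--     then emit one (y, xmin, xmax) per interior scanline that has points."""
--     def scanlines(cnt):
--         bounds = {}
--         for x, y in cnt:
--             lo, hi = bounds.get(y, (x, x))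
--             bounds[y] = (min(lo, x), max(hi, x))
--         y_min = min(bounds)
--         y_max = max(bounds)
--         return [(y,) + bounds[y] for y in range(y_min + 1, y_max) if y in bounds]
--     return [scanlines(cnt) for cnt in cnt_drawn]
-- ===== Notes on version B (the rewrite author's own statement) =====
-- stated objective: faster
-- what changed: A rescans the whole contour once per scanline y in [y_min+1, y_max); B makes a single pass grouping the contour points by y into a dict of running (min x, max x) and then reads the scanlines off the dict.
import Mathlib
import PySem

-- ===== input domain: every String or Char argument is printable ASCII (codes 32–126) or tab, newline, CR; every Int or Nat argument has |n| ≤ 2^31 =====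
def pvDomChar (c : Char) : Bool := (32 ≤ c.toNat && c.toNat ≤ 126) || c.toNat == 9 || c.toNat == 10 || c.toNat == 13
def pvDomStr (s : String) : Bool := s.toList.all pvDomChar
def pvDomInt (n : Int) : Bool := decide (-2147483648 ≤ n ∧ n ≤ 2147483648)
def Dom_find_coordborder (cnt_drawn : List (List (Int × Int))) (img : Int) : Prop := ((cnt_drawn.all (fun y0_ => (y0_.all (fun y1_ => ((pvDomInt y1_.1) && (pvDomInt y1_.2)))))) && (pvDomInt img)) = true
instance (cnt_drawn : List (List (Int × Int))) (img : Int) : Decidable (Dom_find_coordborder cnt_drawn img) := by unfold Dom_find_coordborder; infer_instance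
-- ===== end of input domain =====

-- B replaces A's per-scanline rescan of the whole contour (O(H·N) per contour) by one
-- dict pass grouping points by y with running min/max x (O(N + H) per contour); same values.

-- ===== PORT A =====
-- one iteration of A's outer loop, for one contour cnt
def aContour (cnt : List (Int × Int)) : List (Int × Int × Int) :=
  match PySem.List.min? cnt (fun c => c.1), PySem.List.min? cnt (fun c => c.2),
        PySem.List.max? cnt (fun c => c.1), PySem.List.max? cnt (fun c => c.2) with
  | some cnt_minx, some cnt_miny, some cnt_maxx, some cnt_maxy =>
      let _x_min := cnt_minx.1   -- computed by A, never used
      let _x_max := cnt_maxx.1   -- computed by A, never used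
      let y_min := cnt_miny.2
      let y_max := cnt_maxy.2
      (PySem.List.pyRange (y_min + 1) y_max 1).foldl (fun icoord y =>
        let coord := cnt.foldl (fun coord c =>
          if c.2 == y then coord ++ [(c.1, c.2)] else coord) []
        if coord.length > 0 then
          match PySem.List.min? coord (fun co => co.1), PySem.List.max? coord (fun co => co.1) with
          | some x_imgmin, some x_imgmax => icoord ++ [(y, x_imgmin.1, x_imgmax.1)]
          | _, _ => icoord   -- unreachable: coord ≠ []
        else icoord) []
  | _, _, _, _ => []   -- Python raises ValueError here (empty contour); excluded by Pre_

def find_coordborder (cnt_drawn : List (List (Int × Int))) (img : Int) : List (List (Int × Int × Int)) :=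
  cnt_drawn.foldl (fun img_coord cnt => img_coord ++ [aContour cnt]) []

-- ===== PORT B =====
-- B's dict 'bounds' for one contour: group points by y, tracking running (min x, max x)
def bBounds (cnt : List (Int × Int)) : PySem.Dict Int (Int × Int) :=
  cnt.foldl (fun d c =>
    let b := d.getD c.2 (c.1, c.1)
    d.insert c.2 (min b.1 c.1, max b.2 c.1)) PySem.Dict.empty

-- one contour: read the interior scanlines off the dict
def bContour (cnt : List (Int × Int)) : List (Int × Int × Int) :=
  match PySem.List.min? (bBounds cnt).keys (fun y => y), PySem.List.max? (bBounds cnt).keys (fun y => y) with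
  | some y_min, some y_max =>
      (PySem.List.pyRange (y_min + 1) y_max 1).foldl (fun acc y =>
        match (bBounds cnt).get? y with
        | some b => acc ++ [(y, b.1, b.2)]
        | none => acc) []
  | _, _ => []   -- Python raises ValueError here (empty contour); excluded by Pre_

def find_coordborder_alt (cnt_drawn : List (List (Int × Int))) (img : Int) : List (List (Int × Int × Int)) :=
  cnt_drawn.map bContour

-- ===== PRECONDITION & SPEC =====
-- Pre_ excludes inputs containing an empty contour: Python A raises ValueError there (min() of empty sequence).
def Pre_find_coordborder (cnt_drawn : List (List (Int × Int))) (img : Int) : Prop :=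
  ∀ cnt ∈ cnt_drawn, cnt ≠ []
instance (cnt_drawn : List (List (Int × Int))) (img : Int) : Decidable (Pre_find_coordborder cnt_drawn img) := by unfold Pre_find_coordborder; infer_instance

def pvWitness_find_coordborder : (List (List (Int × Int))) × Int :=
  ([[(0, 0), (0, 2), (2, 2), (2, 0), (0, 1), (2, 1)]], 0)

def Spec_find_coordborder (cnt_drawn : List (List (Int × Int))) (img : Int) (out : List (List (Int × Int × Int))) : Prop := out = find_coordborder_alt cnt_drawn img
instance (cnt_drawn : List (List (Int × Int))) (img : Int) (out : List (List (Int × Int × Int))) : Decidable (Spec_find_coordborder cnt_drawn img out) := by unfold Spec_find_coordborder; infer_instance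

-- ===== CLAIM (what is proved, stated in full; the proofs are below) =====
def Claim_equal_find_coordborder : Prop := ∀ (cnt_drawn : List (List (Int × Int))) (img : Int), Dom_find_coordborder cnt_drawn img → Pre_find_coordborder cnt_drawn img → Spec_find_coordborder cnt_drawn img (find_coordborder cnt_drawn img)

-- ===== LEMMAS AND PROOFS =====

-- effect of one grouped point x on an optional (min x, max x) entry
def mmUpd (o : Option (Int × Int)) (x : Int) : Int × Int :=
  let b := o.getD (x, x); (min b.1 x, max b.2 x)

-- the dict built by B, looked up at y, is a fold of mmUpd over the points on scanline y
theorem bBounds_get? (cnt : List (Int × Int)) (d : PySem.Dict Int (Int × Int)) (y : Int) :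
    (cnt.foldl (fun d c =>
      let b := d.getD c.2 (c.1, c.1)
      d.insert c.2 (min b.1 c.1, max b.2 c.1)) d).get? y
    = (cnt.filter (fun c => c.2 == y)).foldl (fun o c => some (mmUpd o c.1)) (d.get? y) := by
  induction cnt generalizing d with
  | nil => rfl
  | cons c t ih =>
    simp only [List.foldl_cons, List.filter_cons]
    rw [ih]
    by_cases hy : c.2 = y
    · simp [hy, mmUpd, PySem.Dict.getD_eq_get?_getD]
    · simp [hy, PySem.Dict.get?_insert, Ne.symm hy]

theorem mm_fold_pair (t : List (Int × Int)) (lo hi : Int) :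
    t.foldl (fun o c => some (mmUpd o c.1)) (some (lo, hi))
    = some (t.foldl (fun a c => min a c.1) lo, t.foldl (fun a c => max a c.1) hi) := by
  induction t generalizing lo hi with
  | nil => rfl
  | cons c t ih => simpa only [List.foldl_cons, mmUpd] using ih (min lo c.1) (max hi c.1)

-- the key of Python's min(l, key=…) is the running minimum of the keys
theorem min?_key_cons {α : Type} (key : α → Int) (c0 : α) (t : List α) (e : α)
    (h : PySem.List.min? (c0 :: t) key = some e) :
    key e = t.foldl (fun a c => min a (key c)) (key c0) := by
  rw [← List.foldl_map]
  have hmem := PySem.List.min?_mem h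
  have hmin := PySem.List.min?_isMin h
  have hle := PySem.List.foldl_min_le (t.map key) (key c0)
  have hfm := PySem.List.foldl_min_mem (t.map key) (key c0)
  refine le_antisymm ?_ ?_
  · rcases hfm with h0 | hmem'
    · rw [h0]; exact hmin c0 (List.mem_cons_self)
    · obtain ⟨c, hc, hck⟩ := List.mem_map.mp hmem'
      rw [← hck]; exact hmin c (List.mem_cons_of_mem _ hc)
  · rcases List.mem_cons.mp hmem with rfl | he
    · exact hle.1
    · exact hle.2 _ (List.mem_map_of_mem he)

-- the key of Python's max(l, key=…) is the running maximum of the keys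
theorem max?_key_cons {α : Type} (key : α → Int) (c0 : α) (t : List α) (e : α)
    (h : PySem.List.max? (c0 :: t) key = some e) :
    key e = t.foldl (fun a c => max a (key c)) (key c0) := by
  rw [← List.foldl_map]
  have hmem := PySem.List.max?_mem h
  have hmax := PySem.List.max?_isMax h
  have hle := PySem.List.le_foldl_max (t.map key) (key c0)
  have hfm := PySem.List.foldl_max_mem (t.map key) (key c0)
  refine le_antisymm ?_ ?_
  · rcases List.mem_cons.mp hmem with rfl | he
    · exact hle.1
    · exact hle.2 _ (List.mem_map_of_mem he)
  · rcases hfm with h0 | hmem'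
    · rw [h0]; exact hmax c0 (List.mem_cons_self)
    · obtain ⟨c, hc, hck⟩ := List.mem_map.mp hmem'
      rw [← hck]; exact hmax c (List.mem_cons_of_mem _ hc)

-- B's dict keys are exactly the y-coordinates occurring in the contour
theorem mem_bBounds_keys (cnt : List (Int × Int)) (k : Int) :
    k ∈ (bBounds cnt).keys ↔ ∃ c ∈ cnt, c.2 = k := by
  unfold bBounds
  show k ∈ (cnt.foldl (fun d c => d.insert c.2
      (min ((d.getD c.2 (c.1, c.1)).1) c.1, max ((d.getD c.2 (c.1, c.1)).2) c.1))
      PySem.Dict.empty).keys ↔ ∃ c ∈ cnt, c.2 = k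
  rw [PySem.Dict.keys_foldl_insert_key cnt (fun c => c.2)
        (fun d c => (min ((d.getD c.2 (c.1, c.1)).1) c.1, max ((d.getD c.2 (c.1, c.1)).2) c.1))
        PySem.Dict.empty]
  simp [PySem.Dict.keys_empty, PySem.Set.update_nil_left, PySem.Set.mem_ofList, eq_comm]

-- a min over the dict's keys equals the min over the contour's y-coordinates
theorem min_key_agree (cnt : List (Int × Int)) (cmin : Int × Int) (m : Int)
    (hA : PySem.List.min? cnt (fun c => c.2) = some cmin)
    (hB : PySem.List.min? (bBounds cnt).keys (fun y => y) = some m) : m = cmin.2 := by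
  have hmA := PySem.List.min?_mem hA
  have hminA := PySem.List.min?_isMin hA
  have hmB := PySem.List.min?_mem hB
  have hminB := PySem.List.min?_isMin hB
  obtain ⟨c, hc, hck⟩ := (mem_bBounds_keys cnt m).mp hmB
  exact le_antisymm (hminB _ ((mem_bBounds_keys cnt cmin.2).mpr ⟨cmin, hmA, rfl⟩))
    (hck ▸ hminA c hc)

theorem max_key_agree (cnt : List (Int × Int)) (cmax : Int × Int) (m : Int)
    (hA : PySem.List.max? cnt (fun c => c.2) = some cmax)
    (hB : PySem.List.max? (bBounds cnt).keys (fun y => y) = some m) : m = cmax.2 := by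
  have hmA := PySem.List.max?_mem hA
  have hmaxA := PySem.List.max?_isMax hA
  have hmB := PySem.List.max?_mem hB
  have hmaxB := PySem.List.max?_isMax hB
  obtain ⟨c, hc, hck⟩ := (mem_bBounds_keys cnt m).mp hmB
  exact le_antisymm (hck ▸ hmaxA c hc)
    (hmaxB _ ((mem_bBounds_keys cnt cmax.2).mpr ⟨cmax, hmA, rfl⟩))

-- one scanline: A's rescan of the contour produces exactly B's dict entry
theorem scanline_eq (cnt : List (Int × Int)) (icoord : List (Int × Int × Int)) (y : Int) :
    (let coord := cnt.foldl (fun coord c =>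
        if c.2 == y then coord ++ [(c.1, c.2)] else coord) []
     if coord.length > 0 then
       match PySem.List.min? coord (fun co => co.1), PySem.List.max? coord (fun co => co.1) with
       | some x_imgmin, some x_imgmax => icoord ++ [(y, x_imgmin.1, x_imgmax.1)]
       | _, _ => icoord
     else icoord)
    = (match (bBounds cnt).get? y with
       | some b => icoord ++ [(y, b.1, b.2)]
       | none => icoord) := by
  have hco : cnt.foldl (fun coord c =>
      if c.2 == y then coord ++ [(c.1, c.2)] else coord) []
      = cnt.filter (fun c => c.2 == y) := by
    rw [PySem.List.foldl_append_if (p := fun c : Int × Int => c.2 == y)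
          (f := fun c : Int × Int => (c.1, c.2))]
    simp
  have hget : (bBounds cnt).get? y
      = (cnt.filter (fun c => c.2 == y)).foldl (fun o c => some (mmUpd o c.1)) none := by
    unfold bBounds
    rw [bBounds_get?]
    simp
  rw [hget]
  cases hf : cnt.filter (fun c => c.2 == y) with
  | nil => rw [hco, hf]; simp
  | cons p q =>
    have hne : p :: q ≠ ([] : List (Int × Int)) := by simp
    rcases hmin : PySem.List.min? (p :: q) (fun co => co.1) with _ | e1
    · exact absurd (PySem.List.min?_eq_none_iff _ _ |>.mp hmin) hne
    rcases hmax : PySem.List.max? (p :: q) (fun co => co.1) with _ | e2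
    · exact absurd (PySem.List.max?_eq_none_iff _ _ |>.mp hmax) hne
    have h1 := min?_key_cons _ p q e1 hmin
    have h2 := max?_key_cons _ p q e2 hmax
    rw [hco, hf, List.foldl_cons, show mmUpd none p.1 = (p.1, p.1) by simp [mmUpd],
        mm_fold_pair]
    simp only [hmin, hmax, List.length_cons, gt_iff_lt, Nat.zero_lt_succ, if_true]
    rw [h1, h2]

-- per contour: A's body equals B's body on every nonempty contour
theorem contour_eq (cnt : List (Int × Int)) (h : cnt ≠ []) : aContour cnt = bContour cnt := by
  obtain ⟨c0, t, rfl⟩ := List.exists_cons_of_ne_nil h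
  unfold aContour bContour
  rcases hminx : PySem.List.min? (c0 :: t) (fun c => c.1) with _ | cminx
  · exact absurd (PySem.List.min?_eq_none_iff _ _ |>.mp hminx) (by simp)
  rcases hminy : PySem.List.min? (c0 :: t) (fun c => c.2) with _ | cminy
  · exact absurd (PySem.List.min?_eq_none_iff _ _ |>.mp hminy) (by simp)
  rcases hmaxx : PySem.List.max? (c0 :: t) (fun c => c.1) with _ | cmaxx
  · exact absurd (PySem.List.max?_eq_none_iff _ _ |>.mp hmaxx) (by simp)
  rcases hmaxy : PySem.List.max? (c0 :: t) (fun c => c.2) with _ | cmaxy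
  · exact absurd (PySem.List.max?_eq_none_iff _ _ |>.mp hmaxy) (by simp)
  have hkne : (bBounds (c0 :: t)).keys ≠ [] := by
    intro hnil
    have := (mem_bBounds_keys (c0 :: t) c0.2).mpr ⟨c0, List.mem_cons_self, rfl⟩
    rw [hnil] at this; exact absurd this (List.not_mem_nil)
  rcases hkmin : PySem.List.min? (bBounds (c0 :: t)).keys (fun y => y) with _ | ymin
  · exact absurd (PySem.List.min?_eq_none_iff _ _ |>.mp hkmin) hkne
  rcases hkmax : PySem.List.max? (bBounds (c0 :: t)).keys (fun y => y) with _ | ymax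
  · exact absurd (PySem.List.max?_eq_none_iff _ _ |>.mp hkmax) hkne
  have h1 : ymin = cminy.2 := min_key_agree _ cminy ymin hminy hkmin
  have h2 : ymax = cmaxy.2 := max_key_agree _ cmaxy ymax hmaxy hkmax
  subst h1 h2
  exact PySem.List.foldl_congr_mem _ _ _ _ (fun acc y _ => scanline_eq (c0 :: t) acc y)

-- ===== VERDICT (by name: the statement is the Claim_ definition above) =====
theorem find_coordborder_spec : Claim_equal_find_coordborder := by
  intro cnt_drawn img _ hpre
  unfold Spec_find_coordborder find_coordborder find_coordborder_alt
  rw [PySem.List.foldl_append_singleton_eq_map]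
  simp only [List.nil_append]
  exact List.map_congr_left (fun cnt hc => contour_eq cnt (hpre cnt hc))
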